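-- pv_equiv track=rewrite | github.com/5vckcq/multi-Lvl-Coincidence-Analysis | causal_structure_R_data_to_pdf_graph.py | get_formula_level
-- ===== SOURCE A (Python) =====
-- def get_components_from_formula(st, factor_list):
--     # returns a list of the elements of factor_list that appear in the input string st
--     # the returned list is empty if no factor from factor_list appears in st or factor_list is empty, no list of strings or no list at all
--
--     component_list = []                          # declaration of the list
--
--     # since we use several nested lists of causal factors, we have to treat all cases separately
--     # - the factors are elements of the list as in factor_list from main -> first case
--     # - the factors are elements of the elements of the list as in level_factor_list from main -> second case
--     # - the factors are elements of elements of the elements of the list as in level_factor_list_order from main -> third case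
--
--     if isinstance(factor_list[0], str) :
--         # first case: check the elements from factor_list
--         for element in factor_list :
--             if st.find(element) > -1 :
--                 component_list.append(element)
--
--     elif isinstance(factor_list[0], list) :
--         if isinstance(factor_list[0][0], str) :
--             # second case: traverse the sublists of factor_list and check for occurrences in st
--             for m in range(len(factor_list)) :
--                 for element in factor_list[m] :
--                     if st.find(element) > -1 :
--                         component_list.append(element)
--
--         elif isinstance(factor_list[0][0], list) :
--             if isinstance(factor_list[0][0][0], str) :
--                 # third case: traverse the subsublists of factor_list and check for occurrences in st
--                 for m in range(len(factor_list)) :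
--                     for o in range(len(factor_list[m])) :
--                         for element in factor_list[m][o] :
--                             if st.find(element) > -1 :
--                                 component_list.append(element)
--
--     return component_list
--
-- def get_formula_level(st, level_factor_list):
--     # if all factors in st are of the same level, get_formula_level returns this level,
--     # otherwise it returns -1
--
--     inequal = False
--     factors = get_components_from_formula(st, level_factor_list) # list of factors that occur in st
--     level = -1
--
--     # Since we use different forms of nested lists, we have to distinguish the different cases:
--     # case 1: multi_order = True -> level_factor_list is subdivided into levels and causal orders
--     # case 2: multi_order = False -> level_factor_list is only subdivided into levels
--     multi_order = isinstance(level_factor_list[0], list)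
--
--
--     # first case
--     if multi_order :
--         # get the level of factors[0]
--         for m in range(len(level_factor_list)) :
--             for i in range(len(level_factor_list[m])) :
--                 if factors[0] in level_factor_list[m][i] :
--                     level = m
--
--             # check if all remaining factors have the same level as factors[0]
--             for k in range(1,len(factors)):
--                 inequal = True
--                 # for-loop over the orders
--                 for i in range(len(level_factor_list[level])) :
--                     if factors[k] in level_factor_list[level][i] :
--                         inequal = False
--                         break  # after we have found the factor in the right level list, we can stop the loop over the orders
--
--             if inequal:
--                 level = -1
--
--     # second case
--     else :
--         # get the level of factors[0]
--         for i in range(len(level_factor_list)) :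
--             if factors[0] in level_factor_list[i] :
--                 level = i
--
--         # check if all remaining factors have the same level as factors[0]
--         for k in range(1,len(factors)):
--             if not(factors[k] in level_factor_list[level]) :
--                 inequal = True
--                 break  # we can stop after we have found the first factor that is not of the same level as factors[0]
--
--         if inequal:
--             level = -1
--
--     return level
-- ===== SOURCE B (Python) =====
-- def get_formula_level(st, level_factor_list):
--     # One pass builds a factor -> level table (later levels overwrite earlier duplicates),
--     # then every factor occurring in st is checked against the first one's level.
--     level_of = {f: m for m, level in enumerate(level_factor_list) for order in level for f in order}
--     occurring = [f for f in level_of if f in st]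
--     level = level_of[occurring[0]]
--     on_level = {f for order in level_factor_list[level] for f in order}
--     return level if all(f in on_level for f in occurring) else -1
-- ===== Notes on version B (the rewrite author's own statement) =====
-- stated objective: faster
-- what changed: Replaces A's stateful simulation (collect occurring factors with repeated st.find scans, then a level/inequal state machine that re-scans a level list for every level and every collected factor) by a single-pass lookup: one dict comprehension maps each factor to its level, and every occurring factor is checked once against the first occurring factor's level.
-- intended difference: On inputs where some factor occurring in st is not on the (last) level listing the first occurring factor while the last occurring factor is, A returns that level (its inequal flag is reset per factor, so only the last collected factor is actually verified) but B returns -1, the intended value per A's own docstring ('if all factors in st are of the same level ... otherwise -1'). — e.g. on get_formula_level("A*B", [[["A", "B"]], [["A"]]]): A returns 1, B returns -1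
import Mathlib
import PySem

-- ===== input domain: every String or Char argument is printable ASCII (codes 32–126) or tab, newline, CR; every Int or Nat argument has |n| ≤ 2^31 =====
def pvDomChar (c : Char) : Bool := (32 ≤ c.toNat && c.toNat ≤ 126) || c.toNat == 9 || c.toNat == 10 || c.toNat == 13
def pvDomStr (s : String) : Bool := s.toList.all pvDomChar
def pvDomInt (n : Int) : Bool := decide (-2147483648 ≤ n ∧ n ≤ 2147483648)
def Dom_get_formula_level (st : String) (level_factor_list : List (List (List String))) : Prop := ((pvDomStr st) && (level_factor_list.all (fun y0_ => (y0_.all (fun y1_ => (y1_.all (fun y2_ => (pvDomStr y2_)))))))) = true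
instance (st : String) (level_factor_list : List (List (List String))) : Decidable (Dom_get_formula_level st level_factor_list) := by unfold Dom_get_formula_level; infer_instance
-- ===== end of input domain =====

-- B builds a factor-to-level lookup table in one pass and checks every occurring factor
-- against the first one's level, replacing A's stateful per-level re-scanning loops (objective: faster).
-- Where A's reset inequal flag makes it check only the LAST occurring factor, B checks all (see D_).

-- ===== PORT A =====
-- Under the Lean type every element is a list of lists of strings, so Python's isinstance probes
-- select the third branch; probing factor_list[0][0][0] raises IndexError on empty heads (excluded by Pre_).
def get_components_from_formula (st : String) (factor_list : List (List (List String))) : List String :=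
  factor_list.foldl (fun cl sub =>
    sub.foldl (fun cl2 ord =>
      ord.foldl (fun cl3 e => if PySem.Str.find st e > -1 then cl3 ++ [e] else cl3) cl2) cl) []

-- multi_order = isinstance(level_factor_list[0], list) is always True under the Lean type,
-- so only Python's first branch is ported.  State of the m-loop = (inequal, level).
-- The k-loop body 'inequal = True; for i ...: if factors[k] in lfl[level][i]: inequal = False; break'
-- is ported as the search it performs (its result ignores the incoming inequal).
def get_formula_level (st : String) (level_factor_list : List (List (List String))) : Int :=
  let factors := get_components_from_formula st level_factor_list
  let s := (PySem.List.pyRange 0 (level_factor_list.length : Int) 1).foldl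
    (fun (s : Bool × Int) m =>
      -- for i in range(len(lfl[m])): if factors[0] in lfl[m][i]: level = m
      let level := (PySem.List.pyGetD level_factor_list m []).foldl
        (fun lv sub => if PySem.List.pyGetD factors 0 "" ∈ sub then m else lv) s.2
      -- for k in range(1, len(factors)): ... (lfl[level] wraps for level = -1, as in Python)
      let inequal := (PySem.List.pyRange 1 (factors.length : Int) 1).foldl
        (fun _ k =>
          if (PySem.List.pyGetD level_factor_list level []).any
               (fun sub => decide (PySem.List.pyGetD factors k "" ∈ sub))
          then false else true) s.1
      -- if inequal: level = -1
      (inequal, if inequal then -1 else level))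
    (false, -1)
  s.2

-- ===== PORT B =====
-- level_of = {f: m for m, level in enumerate(level_factor_list) for order in level for f in order}
-- occurring = [f for f in level_of if f in st]
-- level = level_of[occurring[0]]          (the key exists on every input Pre_ admits; getD is the total form)
-- on_level = {f for order in level_factor_list[level] for f in order}
-- return level if all(f in on_level for f in occurring) else -1
def get_formula_level_alt (st : String) (level_factor_list : List (List (List String))) : Int :=
  let level_of : PySem.Dict String Int :=
    (PySem.List.enumerate level_factor_list 0).foldl
      (fun d p => p.2.foldl (fun d ord => ord.foldl (fun d f => d.insert f p.1) d) d)
      PySem.Dict.empty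
  let occurring := level_of.keys.filter (fun f => PySem.Str.isIn f st)
  let level := level_of.getD (PySem.List.pyGetD occurring 0 "") (-1)
  let on_level : PySem.Set String :=
    PySem.Set.ofList (PySem.List.pyGetD level_factor_list level []).flatten
  if occurring.all (fun f => PySem.Set.contains on_level f) then level else -1

-- ===== PRECONDITION & SPEC =====
-- Pre_ excludes exactly the inputs on which A raises IndexError: the isinstance probes index
-- level_factor_list[0][0][0], and factors[0] fails when no listed factor occurs in st.
def Pre_get_formula_level (st : String) (level_factor_list : List (List (List String))) : Prop :=
  level_factor_list.headI ≠ [] ∧ level_factor_list.headI.headI ≠ [] ∧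
  (∃ level ∈ level_factor_list, ∃ order ∈ level, ∃ f ∈ order, PySem.Str.isIn f st = true)
instance (st : String) (level_factor_list : List (List (List String))) : Decidable (Pre_get_formula_level st level_factor_list) := by unfold Pre_get_formula_level; infer_instance

def pvWitness_get_formula_level : String × List (List (List String)) :=
  ("A1*B2", [[["A1", "C1"]], [["B2"], ["D2"]]])

-- On inputs where some factor occurring in st is not on the last level m listing the first
-- occurring factor while the LAST occurring factor is, A returns m (its inequal flag is reset
-- per factor, so only the last collected factor is actually verified) but B returns -1, which
-- is the intended value: A's own docstring promises the level only "if all factors in st are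
-- of the same level".
def D_get_formula_level (st : String) (level_factor_list : List (List (List String))) : Prop :=
  let occ := level_factor_list.flatten.flatten.filter (PySem.Str.isIn · st)
  let top := ((level_factor_list.filter (·.flatten.contains occ.headI)).getLastD []).flatten
  occ.getLastD "" ∈ top ∧ ∃ f ∈ occ, f ∉ top
instance (st : String) (level_factor_list : List (List (List String))) : Decidable (D_get_formula_level st level_factor_list) := by unfold D_get_formula_level; infer_instance

def Spec_get_formula_level (st : String) (level_factor_list : List (List (List String))) (out : Int) : Prop := ¬ D_get_formula_level st level_factor_list → out = get_formula_level_alt st level_factor_list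
instance (st : String) (level_factor_list : List (List (List String))) (out : Int) : Decidable (Spec_get_formula_level st level_factor_list out) := by unfold Spec_get_formula_level; infer_instance

def pvDiffWitness_get_formula_level : String × List (List (List String)) :=
  ("A*B", [[["A", "B"]], [["A"]]])

def pvDiffWitnessOut_get_formula_level : Int × Int := (1, -1)

-- ===== CLAIM (what is proved, stated in full; the proofs are below) =====
def Claim_unchanged_get_formula_level : Prop := ∀ (st : String) (level_factor_list : List (List (List String))), Dom_get_formula_level st level_factor_list → Pre_get_formula_level st level_factor_list → Spec_get_formula_level st level_factor_list (get_formula_level st level_factor_list)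
def Claim_changed_get_formula_level : Prop := Dom_get_formula_level (pvDiffWitness_get_formula_level.1) (pvDiffWitness_get_formula_level.2) ∧ Pre_get_formula_level (pvDiffWitness_get_formula_level.1) (pvDiffWitness_get_formula_level.2) ∧ D_get_formula_level (pvDiffWitness_get_formula_level.1) (pvDiffWitness_get_formula_level.2) ∧ get_formula_level (pvDiffWitness_get_formula_level.1) (pvDiffWitness_get_formula_level.2) = pvDiffWitnessOut_get_formula_level.1 ∧ get_formula_level_alt (pvDiffWitness_get_formula_level.1) (pvDiffWitness_get_formula_level.2) = pvDiffWitnessOut_get_formula_level.2 ∧ pvDiffWitnessOut_get_formula_level.1 ≠ pvDiffWitnessOut_get_formula_level.2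
def Claim_exact_get_formula_level : Prop := ∀ (st : String) (level_factor_list : List (List (List String))), Dom_get_formula_level st level_factor_list → Pre_get_formula_level st level_factor_list → D_get_formula_level st level_factor_list → get_formula_level st level_factor_list ≠ get_formula_level_alt st level_factor_list

-- ===== LEMMAS AND PROOFS =====

-- the factors occurring in st in traversal order, and the factor set of the last level
-- listing the first occurring factor (the lists D_ inspects)
def pvOcc (st : String) (lfl : List (List (List String))) : List String :=
  lfl.flatMap (fun lvl => lvl.flatMap (fun order => order.filter (fun f => PySem.Str.isIn f st)))

def pvLast (st : String) (lfl : List (List (List String))) : List String :=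
  ((lfl.filter (fun lvl => decide ((pvOcc st lfl).headI ∈ lvl.flatten))).getLastD []).flatten

-- the per-level occurring factors (pvOcc is its flatMap, definitionally)
def pvG (st : String) (lvl : List (List String)) : List String :=
  lvl.flatMap (fun order => order.filter (fun f => PySem.Str.isIn f st))

lemma pvOcc_eq (st : String) (lfl : List (List (List String))) :
    pvOcc st lfl = lfl.flatMap (pvG st) := rfl

-- does x occur in some order-sublist of a level?  (the membership scan A runs)
def pvFlatq (x : String) (lvl : List (List String)) : Bool := lvl.any (fun o => decide (x ∈ o))

-- B's dict (does not depend on st)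
def pvDict (lfl : List (List (List String))) : PySem.Dict String Int :=
  (PySem.List.enumerate lfl 0).foldl
    (fun d p => p.2.foldl (fun d ord => ord.foldl (fun d f => d.insert f p.1) d) d)
    PySem.Dict.empty

-- B's occurring list and level
def pvOccurring (st : String) (lfl : List (List (List String))) : List String :=
  (pvDict lfl).keys.filter (fun f => PySem.Str.isIn f st)

def pvLevel (st : String) (lfl : List (List (List String))) : Int :=
  (pvDict lfl).getD (PySem.List.pyGetD (pvOccurring st lfl) 0 "") (-1)

def pvScan (factors : List String) (lfl : List (List (List String))) (m s2 : Int) : Int :=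
  (PySem.List.pyGetD lfl m []).foldl
    (fun lv sub => if PySem.List.pyGetD factors 0 "" ∈ sub then m else lv) s2

def pvIneq (factors : List String) (lfl : List (List (List String))) (level : Int) (s1 : Bool) : Bool :=
  (PySem.List.pyRange 1 (factors.length : Int) 1).foldl
    (fun _ k =>
      if (PySem.List.pyGetD lfl level []).any
           (fun sub => decide (PySem.List.pyGetD factors k "" ∈ sub))
      then false else true) s1

def pvStep (lfl : List (List (List String))) (factors : List String) (s : Bool × Int) (m : Int) : Bool × Int :=
  (pvIneq factors lfl (pvScan factors lfl m s.2) s.1,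
   if pvIneq factors lfl (pvScan factors lfl m s.2) s.1 then -1 else pvScan factors lfl m s.2)

lemma pvStep_def (lfl : List (List (List String))) (factors : List String) (s : Bool × Int) (m : Int) :
    pvStep lfl factors s m =
      (pvIneq factors lfl (pvScan factors lfl m s.2) s.1,
       if pvIneq factors lfl (pvScan factors lfl m s.2) s.1 then -1 else pvScan factors lfl m s.2) := rfl

lemma pvA_eq (st : String) (lfl : List (List (List String))) :
    get_formula_level st lfl =
      ((PySem.List.pyRange 0 (lfl.length : Int) 1).foldl
        (pvStep lfl (get_components_from_formula st lfl)) (false, -1)).2 := rfl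


lemma pvB_eq (st : String) (lfl : List (List (List String))) :
    get_formula_level_alt st lfl =
      if (pvOccurring st lfl).all (fun f =>
           PySem.Set.contains (PySem.Set.ofList (PySem.List.pyGetD lfl (pvLevel st lfl) []).flatten) f)
      then pvLevel st lfl else -1 := rfl

lemma pvP_eq (st : String) :
    (fun f => decide (PySem.Str.find st f > -1)) = (fun f => PySem.Str.isIn f st) := by
  funext f
  have h1 := PySem.Chars.find_nonneg_iff st.toList f.toList
  have h2 := PySem.Chars.isIn_iff_infix f.toList st.toList
  by_cases h : f.toList <:+: st.toList
  · have h3 : (-1:Int) < PySem.Chars.find st.toList f.toList := by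
      have := h1.mpr h; omega
    simp [h3, h2.mpr h]
  · have h3 : ¬ (-1:Int) < PySem.Chars.find st.toList f.toList := by
      intro hh; exact h (h1.mp (by omega))
    have h4 : PySem.Chars.isIn f.toList st.toList = false := by
      cases hb : PySem.Chars.isIn f.toList st.toList
      · rfl
      · exact absurd (h2.mp hb) h
    simp [h3, h4]

lemma pvComp_eq (st : String) (lfl : List (List (List String))) :
    get_components_from_formula st lfl = pvOcc st lfl := by
  unfold get_components_from_formula pvOcc
  simp only [PySem.List.foldl_append_ite_eq_filter (fun e => PySem.Str.find st e > -1),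
    PySem.List.foldl_append_eq_flatMap, pvP_eq st, List.nil_append]

lemma pvScan_eq (factors : List String) (lfl : List (List (List String))) (m s2 : Int) :
    pvScan factors lfl m s2 =
      if pvFlatq (PySem.List.pyGetD factors 0 "") (PySem.List.pyGetD lfl m []) then m else s2 := by
  unfold pvScan
  induction (PySem.List.pyGetD lfl m []) generalizing s2 with
  | nil => simp [pvFlatq]
  | cons h t ih =>
    rw [List.foldl_cons, ih]
    by_cases h1 : PySem.List.pyGetD factors 0 "" ∈ h <;> simp [pvFlatq, h1]

lemma pvIneq_eq_len1 (factors : List String) (lfl : List (List (List String))) (level : Int)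
    (s1 : Bool) (hlen : factors.length ≤ 1) : pvIneq factors lfl level s1 = s1 := by
  unfold pvIneq
  rw [PySem.List.pyRange_one_eq_nil (by exact_mod_cast hlen)]
  rfl

lemma pvIneq_eq_len2 (factors : List String) (lfl : List (List (List String))) (level : Int)
    (s1 : Bool) (hlen : 2 ≤ factors.length) :
    pvIneq factors lfl level s1 =
      !(pvFlatq (PySem.List.pyGetD factors ((factors.length : Int) - 1) "")
          (PySem.List.pyGetD lfl level [])) := by
  unfold pvIneq
  have hsplit : PySem.List.pyRange 1 (factors.length : Int) 1
      = PySem.List.pyRange 1 ((factors.length : Int) - 1) 1 ++ [(factors.length : Int) - 1] := by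
    have h := PySem.List.pyRange_one_succ_right (a := 1) (b := (factors.length : Int) - 1) (by omega)
    simpa using h
  rw [hsplit, List.foldl_append]
  simp only [List.foldl_cons, List.foldl_nil]
  cases hq : pvFlatq (PySem.List.pyGetD factors ((factors.length : Int) - 1) "")
      (PySem.List.pyGetD lfl level []) with
  | false =>
    simp only [pvFlatq] at hq
    simp [hq]
  | true =>
    simp only [pvFlatq] at hq
    simp [hq]

lemma pvFoldl_inv {α β : Type} (P : β → Prop) (f : β → α → β) (l : List α)
    (h : ∀ s x, x ∈ l → P s → P (f s x)) (i : β) (hi : P i) : P (l.foldl f i) := by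
  induction l generalizing i with
  | nil => exact hi
  | cons a t ih =>
    exact ih (fun s x hx hs => h s x (List.mem_cons_of_mem a hx) hs) _
      (h i a List.mem_cons_self hi)

lemma pvGetD_last (factors : List String) (h : factors ≠ []) :
    PySem.List.pyGetD factors ((factors.length : Int) - 1) "" = factors.getLast h := by
  have hlen : 0 < factors.length := List.length_pos_iff.mpr h
  rw [PySem.List.pyGetD_eq_getElem factors "" (by omega) (by omega), List.getLast_eq_getElem]
  congr 1
  omega

lemma pvGetD_nat {α : Type} (xs : List α) (d : α) (i : Nat) (h : i < xs.length) :
    PySem.List.pyGetD xs (i : Int) d = xs[i] := by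
  rw [PySem.List.pyGetD_eq_getElem xs d (by omega) (by exact_mod_cast h)]
  simp

-- membership bridges
lemma pvFlatq_iff (x : String) (lvl : List (List String)) :
    pvFlatq x lvl = true ↔ x ∈ lvl.flatten := by
  simp [pvFlatq, List.mem_flatten, List.any_eq_true]

lemma pvG_mem_iff (st : String) (lvl : List (List String)) (f : String) :
    f ∈ pvG st lvl ↔ f ∈ lvl.flatten ∧ PySem.Str.isIn f st = true := by
  simp [pvG, List.mem_flatMap, List.mem_flatten, List.mem_filter]
  tauto

lemma pvOcc_mem_iff (st : String) (lfl : List (List (List String))) (f : String) :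
    f ∈ pvOcc st lfl ↔ (∃ lvl ∈ lfl, f ∈ lvl.flatten) ∧ PySem.Str.isIn f st = true := by
  rw [pvOcc_eq]
  simp only [List.mem_flatMap]
  constructor
  · rintro ⟨lvl, hlvl, hf⟩
    obtain ⟨h1, h2⟩ := (pvG_mem_iff st lvl f).mp hf
    exact ⟨⟨lvl, hlvl, h1⟩, h2⟩
  · rintro ⟨⟨lvl, hlvl, h1⟩, h2⟩
    exact ⟨lvl, hlvl, (pvG_mem_iff st lvl f).mpr ⟨h1, h2⟩⟩


lemma pvGetLast_congr {b : Type} (l l' : List b) (hl : l = l') (h : l ≠ []) (h' : l' ≠ []) :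
    l.getLast h = l'.getLast h' := by subst hl; rfl


-- ----- B's dict: get? and keys of the build -----

lemma pvOrd_get (m : Int) (f : String) (ord : List String) (d : PySem.Dict String Int) :
    (ord.foldl (fun d g => d.insert g m) d).get? f = if f ∈ ord then some m else d.get? f := by
  induction ord generalizing d with
  | nil => simp
  | cons g t ih =>
    rw [List.foldl_cons, ih]
    by_cases hf : f ∈ t
    · simp [hf]
    · by_cases hfg : f = g
      · subst hfg
        simp [hf, PySem.Dict.get?_insert_self]
      · rw [PySem.Dict.get?_insert_of_ne _ _ hfg]
        simp [List.mem_cons, hf, hfg]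

lemma pvLvl_get (m : Int) (f : String) (lvl : List (List String)) (d : PySem.Dict String Int) :
    (lvl.foldl (fun d ord => ord.foldl (fun d g => d.insert g m) d) d).get? f
      = if f ∈ lvl.flatten then some m else d.get? f := by
  induction lvl generalizing d with
  | nil => simp
  | cons o t ih =>
    rw [List.foldl_cons, ih, pvOrd_get]
    by_cases h1 : f ∈ t.flatten <;> by_cases h2 : f ∈ o <;>
      simp [List.flatten_cons, List.mem_append, h1, h2]

lemma pvDict_append (L : List (List (List String))) (lvl : List (List String)) (f : String) :
    (pvDict (L ++ [lvl])).get? f =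
      if f ∈ lvl.flatten then some ((L.length : Nat) : Int) else (pvDict L).get? f := by
  unfold pvDict
  rw [PySem.List.enumerate_append, List.foldl_append]
  simp only [PySem.List.enumerate_cons, PySem.List.enumerate_nil, List.foldl_cons, List.foldl_nil]
  rw [pvLvl_get]
  norm_num

lemma pvDict_get?_spec (lfl : List (List (List String))) (f : String)
    (h : ∃ lvl ∈ lfl, f ∈ lvl.flatten) :
    ∃ n, ∃ hn : n < lfl.length, (pvDict lfl).get? f = some ((n : Nat) : Int) ∧
      f ∈ lfl[n].flatten ∧ ∀ j, ∀ hj : j < lfl.length, n < j → f ∉ lfl[j].flatten := by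
  induction lfl using List.reverseRecOn with
  | nil => simp at h
  | append_singleton L lvl ih =>
    by_cases hin : f ∈ lvl.flatten
    · refine ⟨L.length, by simp, ?_, ?_, ?_⟩
      · rw [pvDict_append, if_pos hin]
      · rw [List.getElem_concat_length rfl]
        exact hin
      · intro j hj hgt
        exfalso
        simp at hj
        omega
    · have h' : ∃ lvl' ∈ L, f ∈ lvl'.flatten := by
        obtain ⟨lv, hlv, hf⟩ := h
        rcases List.mem_append.mp hlv with h1 | h2
        · exact ⟨lv, h1, hf⟩
        · rw [List.mem_singleton.mp h2] at hf
          exact absurd hf hin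
      obtain ⟨n, hn, hg, hfn, hlater⟩ := ih h'
      refine ⟨n, by simp; omega, ?_, ?_, ?_⟩
      · rw [pvDict_append, if_neg hin, hg]
      · rw [List.getElem_append_left hn]
        exact hfn
      · intro j hj hgt
        by_cases hjL : j < L.length
        · rw [List.getElem_append_left hjL]
          exact hlater j hjL hgt
        · have hje : j = L.length := by simp at hj; omega
          subst hje
          rw [List.getElem_concat_length rfl]
          exact hin

lemma pvKeys_ord (m : Int) (ord : List String) (d : PySem.Dict String Int) :
    (ord.foldl (fun d g => d.insert g m) d).keys = PySem.Set.update d.keys ord :=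
  PySem.Dict.keys_foldl_insert ord (fun _ _ => m) d

lemma pvKeys_lvl (m : Int) (lvl : List (List String)) (d : PySem.Dict String Int) :
    (lvl.foldl (fun d ord => ord.foldl (fun d g => d.insert g m) d) d).keys
      = PySem.Set.update d.keys lvl.flatten := by
  induction lvl generalizing d with
  | nil => rfl
  | cons o t ih =>
    rw [List.foldl_cons, ih, pvKeys_ord, List.flatten_cons]
    show PySem.Set.update (PySem.Set.update d.keys o) t.flatten
      = (o ++ t.flatten).foldl PySem.Set.add d.keys
    rw [List.foldl_append]
    rfl

lemma pvKeys_outer (L : List (Int × List (List String))) (d : PySem.Dict String Int) :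
    (L.foldl (fun d p => p.2.foldl (fun d ord => ord.foldl (fun d g => d.insert g p.1) d) d) d).keys
      = PySem.Set.update d.keys (L.flatMap (fun p => p.2.flatten)) := by
  induction L generalizing d with
  | nil => rfl
  | cons p t ih =>
    rw [List.foldl_cons, ih, pvKeys_lvl, List.flatMap_cons]
    show PySem.Set.update (PySem.Set.update d.keys p.2.flatten) (t.flatMap (fun p => p.2.flatten))
      = (p.2.flatten ++ t.flatMap (fun p => p.2.flatten)).foldl PySem.Set.add d.keys
    rw [List.foldl_append]
    rfl

lemma pvKeys_dict (lfl : List (List (List String))) :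
    (pvDict lfl).keys = PySem.Set.ofList (lfl.flatMap List.flatten) := by
  unfold pvDict
  rw [pvKeys_outer]
  have h1 : (PySem.List.enumerate lfl 0).flatMap (fun p => p.2.flatten)
      = lfl.flatMap List.flatten := by
    conv_rhs => rw [← PySem.List.map_snd_enumerate lfl 0]
    rw [List.flatMap_map]
  rw [h1]
  rfl

lemma pvKeys_mem (lfl : List (List (List String))) (f : String) :
    f ∈ (pvDict lfl).keys ↔ ∃ lvl ∈ lfl, f ∈ lvl.flatten := by
  rw [pvKeys_dict, PySem.Set.mem_ofList]
  simp [List.mem_flatMap]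

-- the first element of a dedup'd list satisfying P is the first such element of the list
lemma pvDedup_filter_head (P : String → Bool) :
    ∀ (xs s : List String),
      ((xs.foldl PySem.Set.add s).filter P).head? = ((s ++ xs).filter P).head? := by
  intro xs
  induction xs with
  | nil => intro s; simp
  | cons x t ih =>
    intro s
    rw [List.foldl_cons, ih (PySem.Set.add s x)]
    by_cases hxs : x ∈ s
    · have hadd : PySem.Set.add s x = s := by simp [PySem.Set.add, hxs]
      rw [hadd, List.filter_append, List.filter_append]
      by_cases hsP : s.filter P = []
      · rw [hsP]
        simp only [List.nil_append]
        have hPx : P x = false := by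
          cases hpx : P x
          · rfl
          · exfalso
            have hmem : x ∈ s.filter P := List.mem_filter.mpr ⟨hxs, hpx⟩
            rw [hsP] at hmem
            simp at hmem
        simp [hPx]
      · rw [List.head?_append, List.head?_append]
        cases hh : (s.filter P).head? with
        | none => exact absurd (List.head?_eq_none_iff.mp hh) hsP
        | some v => simp
    · have hadd : PySem.Set.add s x = s ++ [x] := by simp [PySem.Set.add, hxs]
      rw [hadd, List.append_assoc]
      rfl

-- pvOcc is the occurrence-filter of the full factor list
lemma pvOcc_eq_filter (st : String) (lfl : List (List (List String))) :
    pvOcc st lfl = (lfl.flatMap List.flatten).filter (fun f => PySem.Str.isIn f st) := by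
  unfold pvOcc
  rw [List.filter_flatMap]
  simp only [List.flatten_eq_flatMap, List.filter_flatMap]
  rfl

-- D_ unfolded to the named lists
lemma pvD_iff (st : String) (lfl : List (List (List String))) :
    D_get_formula_level st lfl ↔
      ((pvOcc st lfl).getLastD "" ∈ pvLast st lfl ∧ ∃ f ∈ pvOcc st lfl, f ∉ pvLast st lfl) := by
  have hocc : lfl.flatten.flatten.filter (PySem.Str.isIn · st) = pvOcc st lfl := by
    rw [pvOcc_eq_filter]
    congr 1
    induction lfl with
    | nil => rfl
    | cons a t ih => simp [List.flatten_cons, List.flatten_append, ih]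
  have hpred : (fun lvl : List (List String) =>
      lvl.flatten.contains (pvOcc st lfl).headI)
      = (fun lvl : List (List String) => decide ((pvOcc st lfl).headI ∈ lvl.flatten)) := by
    funext lvl
    simp
  unfold D_get_formula_level pvLast
  dsimp only
  rw [hocc, hpred]

-- B's occurring list has the same first element as pvOcc (dedup keeps first occurrences)
lemma pvOccurring_head (st : String) (lfl : List (List (List String))) :
    (pvOccurring st lfl).head? = (pvOcc st lfl).head? := by
  unfold pvOccurring
  rw [pvKeys_dict, PySem.Set.ofList_eq_foldl,
    pvDedup_filter_head (fun f => PySem.Str.isIn f st) (lfl.flatMap List.flatten) [],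
    List.nil_append, ← pvOcc_eq_filter]

-- and the same elements
lemma pvOccurring_mem (st : String) (lfl : List (List (List String))) (f : String) :
    f ∈ pvOccurring st lfl ↔ f ∈ pvOcc st lfl := by
  unfold pvOccurring
  rw [List.mem_filter, pvKeys_mem, pvOcc_mem_iff]

lemma pvGetD_zero_head {α : Type} (xs : List α) (d : α) :
    PySem.List.pyGetD xs 0 d = xs.head?.getD d := by
  rw [PySem.List.pyGetD_zero]
  cases xs <;> simp

lemma pvA_char (st : String) (lfl : List (List (List String)))
    (hne : pvOcc st lfl ≠ [])
    (n0 : Nat) (hn0 : n0 < lfl.length)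
    (hqn0 : pvFlatq (PySem.List.pyGetD (pvOcc st lfl) 0 "") lfl[n0] = true)
    (hmax : ∀ j : Nat, ∀ hj : j < lfl.length,
      pvFlatq (PySem.List.pyGetD (pvOcc st lfl) 0 "") lfl[j] = true → j ≤ n0) :
    get_formula_level st lfl =
      if pvFlatq ((pvOcc st lfl).getLast hne) lfl[n0] then (n0 : Int) else -1 := by
  set occ := pvOcc st lfl with hoccdef
  set F0 := PySem.List.pyGetD occ 0 "" with hF0def
  set FL := occ.getLast hne with hFLdef
  rw [pvA_eq, pvComp_eq, ← hoccdef]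
  have hsplit1 : PySem.List.pyRange 0 (lfl.length : Int) 1
      = PySem.List.pyRange 0 ((n0 : Int) + 1) 1 ++ PySem.List.pyRange ((n0 : Int) + 1) (lfl.length : Int) 1 :=
    PySem.List.pyRange_one_append _ _ _ (by omega) (by exact_mod_cast hn0)
  have hsplit2 : PySem.List.pyRange 0 ((n0 : Int) + 1) 1
      = PySem.List.pyRange 0 (n0 : Int) 1 ++ [(n0 : Int)] :=
    PySem.List.pyRange_one_succ_right (by omega)
  rw [hsplit1, List.foldl_append, hsplit2, List.foldl_append]
  have htail : ∀ (m : Int), m ∈ PySem.List.pyRange ((n0 : Int) + 1) (lfl.length : Int) 1 →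
      ∀ s2 : Int, pvScan occ lfl m s2 = s2 := by
    intro m hm s2
    obtain ⟨hm1, hm2⟩ := PySem.List.mem_pyRange_one.mp hm
    rw [pvScan_eq, ← hF0def]
    have hq : pvFlatq F0 (PySem.List.pyGetD lfl m []) = false := by
      rw [PySem.List.pyGetD_eq_getElem lfl [] (by omega) hm2]
      cases hb : pvFlatq F0 lfl[m.toNat] with
      | false => rfl
      | true =>
        have := hmax m.toNat (by omega) hb
        omega
    rw [hq]
    simp
  have hscan_n0 : ∀ s2 : Int, pvScan occ lfl (n0 : Int) s2 = (n0 : Int) := by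
    intro s2
    rw [pvScan_eq, ← hF0def, pvGetD_nat lfl [] n0 hn0, hqn0]
    simp
  by_cases hcase : 2 ≤ occ.length
  · have hFL' : PySem.List.pyGetD occ ((occ.length : Int) - 1) "" = FL := by
      rw [pvGetD_last occ hne, hFLdef]
    set s1 := (PySem.List.pyRange 0 (n0 : Int) 1).foldl (pvStep lfl occ) (false, -1) with hs1
    have hstep : (pvStep lfl occ s1 (n0 : Int)).2 = if pvFlatq FL lfl[n0] then (n0 : Int) else -1 := by
      rw [pvStep_def]
      rw [hscan_n0, pvIneq_eq_len2 occ lfl _ _ hcase, hFL', pvGetD_nat lfl [] n0 hn0]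
      cases pvFlatq FL lfl[n0] <;> simp
    have hinv : ∀ s : Bool × Int, s.2 = (if pvFlatq FL lfl[n0] then (n0 : Int) else -1) →
        ∀ m ∈ PySem.List.pyRange ((n0 : Int) + 1) (lfl.length : Int) 1,
        (pvStep lfl occ s m).2 = (if pvFlatq FL lfl[n0] then (n0 : Int) else -1) := by
      intro s hs m hm
      by_cases hb : pvFlatq FL lfl[n0] = true
      · rw [if_pos hb] at hs ⊢
        rw [pvStep_def, htail m hm, hs, pvIneq_eq_len2 occ lfl _ _ hcase, hFL',
          pvGetD_nat lfl [] n0 hn0, hb]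
        simp
      · rw [if_neg hb] at hs ⊢
        rw [pvStep_def, htail m hm, hs, pvIneq_eq_len2 occ lfl _ _ hcase, hFL']
        cases pvFlatq FL (PySem.List.pyGetD lfl (-1) []) <;> simp
    refine pvFoldl_inv (fun s => s.2 = (if pvFlatq FL lfl[n0] then (n0 : Int) else -1))
      (pvStep lfl occ) _ (fun s m hm hs => hinv s hs m hm) _ ?_
    simp only [List.foldl_cons, List.foldl_nil]
    exact hstep
  · have hlen1 : occ.length = 1 := by
      have : 0 < occ.length := List.length_pos_iff.mpr hne
      omega
    obtain ⟨a, he⟩ := List.length_eq_one_iff.mp hlen1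
    have hF0FL : FL = F0 := by
      have h1 : FL = a := by
        rw [hFLdef, pvGetLast_congr _ _ he hne (by simp)]
        rfl
      have h2 : F0 = a := by
        rw [hF0def, he, PySem.List.pyGetD_zero_cons]
      rw [h1, h2]
    have hstep1 : ∀ (s : Bool × Int) (m : Int), (pvStep lfl occ s m).1 = s.1 := by
      intro s m
      rw [pvStep_def]
      rw [pvIneq_eq_len1 occ lfl _ _ (by omega)]
    have hfst : ∀ (l : List Int) (s : Bool × Int), (l.foldl (pvStep lfl occ) s).1 = s.1 := by
      intro l
      induction l with
      | nil => intro s; rfl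
      | cons x t ih => intro s; rw [List.foldl_cons, ih, hstep1]
    have hstep : pvStep lfl occ ((PySem.List.pyRange 0 (n0 : Int) 1).foldl (pvStep lfl occ) (false, -1)) (n0 : Int)
        = (false, (n0 : Int)) := by
      rw [pvStep_def]
      rw [hscan_n0, pvIneq_eq_len1 occ lfl _ _ (by omega), hfst]
      rfl
    simp only [List.foldl_cons, List.foldl_nil]
    rw [hstep]
    have hfin : (PySem.List.pyRange ((n0 : Int) + 1) (lfl.length : Int) 1).foldl
        (pvStep lfl occ) (false, (n0 : Int)) = (false, (n0 : Int)) := by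
      refine pvFoldl_inv (fun s => s = (false, (n0 : Int))) (pvStep lfl occ) _ ?_ _ rfl
      intro s m hm hs
      rw [pvStep_def, hs, pvIneq_eq_len1 occ lfl _ _ (by omega), htail m hm]
      rfl
    rw [hfin, hF0FL]
    rw [show pvFlatq F0 lfl[n0] = true from hqn0]
    rfl


-- common setup: under Pre_, A's characterizing level n0 (the last level of the first factor)
lemma pvSetup (st : String) (lfl : List (List (List String)))
    (hne : pvOcc st lfl ≠ []) :
    ∃ n0, ∃ hn0 : n0 < lfl.length,
      PySem.List.pyGetD (pvOcc st lfl) 0 "" ∈ lfl[n0].flatten ∧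
      (pvDict lfl).get? (PySem.List.pyGetD (pvOcc st lfl) 0 "") = some ((n0 : Nat) : Int) ∧
      (∀ j, ∀ hj : j < lfl.length, n0 < j →
        PySem.List.pyGetD (pvOcc st lfl) 0 "" ∉ lfl[j].flatten) := by
  set F0 := PySem.List.pyGetD (pvOcc st lfl) 0 "" with hF0def
  have hF0mem : F0 ∈ pvOcc st lfl := by
    obtain ⟨a, t, he⟩ := List.exists_cons_of_ne_nil hne
    rw [hF0def, he, PySem.List.pyGetD_zero_cons]
    exact List.mem_cons_self
  obtain ⟨hlisted, _⟩ := (pvOcc_mem_iff st lfl F0).mp hF0mem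
  obtain ⟨n0, hn0, hg, hfn, hlater⟩ := pvDict_get?_spec lfl F0 hlisted
  exact ⟨n0, hn0, hfn, hg, hlater⟩

-- B computes: the last level of the first occurring factor if every occurring factor is on it, else -1
lemma pvB_char (st : String) (lfl : List (List (List String)))
    (n0 : Nat) (hn0 : n0 < lfl.length)
    (hget : (pvDict lfl).get? (PySem.List.pyGetD (pvOcc st lfl) 0 "") = some ((n0 : Nat) : Int)) :
    get_formula_level_alt st lfl =
      if ∀ f ∈ pvOcc st lfl, f ∈ lfl[n0].flatten then ((n0 : Nat) : Int) else -1 := by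
  have hheadeq : PySem.List.pyGetD (pvOccurring st lfl) 0 ""
      = PySem.List.pyGetD (pvOcc st lfl) 0 "" := by
    rw [pvGetD_zero_head, pvGetD_zero_head, pvOccurring_head]
  have hlevel : pvLevel st lfl = ((n0 : Nat) : Int) := by
    unfold pvLevel
    rw [hheadeq, PySem.Dict.getD_eq_get?_getD, hget]
    rfl
  rw [pvB_eq, hlevel]
  have hfl : PySem.List.pyGetD lfl ((n0 : Nat) : Int) [] = lfl[n0] := pvGetD_nat lfl [] n0 hn0
  rw [hfl]
  have hall_iff : ((pvOccurring st lfl).all (fun f =>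
      PySem.Set.contains (PySem.Set.ofList lfl[n0].flatten) f) = true)
      ↔ (∀ f ∈ pvOcc st lfl, f ∈ lfl[n0].flatten) := by
    rw [List.all_eq_true]
    constructor
    · intro h f hf
      have := h f ((pvOccurring_mem st lfl f).mpr hf)
      simpa [PySem.Set.contains, PySem.Set.mem_ofList] using this
    · intro h f hf
      have := h f ((pvOccurring_mem st lfl f).mp hf)
      simpa [PySem.Set.contains, PySem.Set.mem_ofList] using this
  by_cases hall : ∀ f ∈ pvOcc st lfl, f ∈ lfl[n0].flatten
  · rw [if_pos (hall_iff.mpr hall), if_pos hall]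
  · rw [if_neg (fun hc => hall (hall_iff.mp hc)), if_neg hall]

lemma pvHeadI_eq (st : String) (lfl : List (List (List String))) (hne : pvOcc st lfl ≠ []) :
    (pvOcc st lfl).headI = PySem.List.pyGetD (pvOcc st lfl) 0 "" := by
  obtain ⟨a, t, he⟩ := List.exists_cons_of_ne_nil hne
  rw [he, PySem.List.pyGetD_zero_cons]
  rfl

-- getLastD of a filter is the element at the greatest index satisfying the predicate
lemma pvFilter_getLast {b : Type} (q : b → Bool) (d : b) (L : List b) (n : Nat)
    (hn : n < L.length) (hq : q L[n] = true)
    (hafter : ∀ j, ∀ hj : j < L.length, n < j → q L[j] = false) :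
    (L.filter q).getLastD d = L[n] := by
  induction L using List.reverseRecOn with
  | nil => simp at hn
  | append_singleton M a ih =>
    by_cases hend : n = M.length
    · subst hend
      rw [List.getElem_concat_length rfl] at hq
      rw [List.filter_append, List.filter_cons, hq]
      simp
    · have hnM : n < M.length := by simp at hn; omega
      have hqa : q a = false := by
        have := hafter M.length (by simp) (by omega)
        rwa [List.getElem_concat_length rfl] at this
      rw [List.filter_append, List.filter_cons, hqa]
      simp only [List.filter_nil, Bool.false_eq_true, if_false, List.append_nil]
      rw [List.getElem_append_left hnM] at hq
      rw [List.getElem_append_left hnM]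
      refine ih hnM hq ?_
      intro j hj hgt
      have := hafter j (by simp; omega) hgt
      rwa [List.getElem_append_left hj] at this

-- under the setup facts, pvLast is the factor list of level n0
lemma pvLast_eq (st : String) (lfl : List (List (List String))) (hne : pvOcc st lfl ≠ [])
    (n0 : Nat) (hn0 : n0 < lfl.length)
    (hfn0 : PySem.List.pyGetD (pvOcc st lfl) 0 "" ∈ lfl[n0].flatten)
    (hlater : ∀ j, ∀ hj : j < lfl.length, n0 < j →
      PySem.List.pyGetD (pvOcc st lfl) 0 "" ∉ lfl[j].flatten) :
    pvLast st lfl = lfl[n0].flatten := by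
  unfold pvLast
  simp only [pvHeadI_eq st lfl hne]
  rw [pvFilter_getLast _ [] lfl n0 hn0 (by simpa using hfn0)
    (fun j hj hgt => by simpa using hlater j hj hgt)]

-- bridges from D_'s getD/headI/getLastD formulation
lemma pvGetLastD_eq (st : String) (lfl : List (List (List String))) (hne : pvOcc st lfl ≠ []) :
    (pvOcc st lfl).getLastD "" = (pvOcc st lfl).getLast hne := by
  rw [List.getLastD_eq_getLast?, List.getLast?_eq_some_getLast hne]
  rfl

-- under Pre_, the occurring list is nonempty
lemma pvPre_ne (st : String) (lfl : List (List (List String)))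
    (hpre : Pre_get_formula_level st lfl) : pvOcc st lfl ≠ [] := by
  obtain ⟨_, _, lvlw, hlvlw, ow, how, fw, hfw, hqw⟩ := hpre
  exact List.ne_nil_of_mem ((pvOcc_mem_iff st lfl fw).mpr
    ⟨⟨lvlw, hlvlw, List.mem_flatten.mpr ⟨ow, how, hfw⟩⟩, hqw⟩)

-- ===== VERDICT (by name: the statements are the Claim_ definitions above) =====
theorem get_formula_level_spec : Claim_unchanged_get_formula_level := by
  intro st lfl hdom hpre
  unfold Spec_get_formula_level
  intro hnD
  have hne : pvOcc st lfl ≠ [] := pvPre_ne st lfl hpre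
  obtain ⟨n0, hn0, hfn0, hget, hlater⟩ := pvSetup st lfl hne
  set F0 := PySem.List.pyGetD (pvOcc st lfl) 0 "" with hF0def
  have hqn0 : pvFlatq F0 lfl[n0] = true := (pvFlatq_iff F0 lfl[n0]).mpr hfn0
  have hmax : ∀ j : Nat, ∀ hj : j < lfl.length, pvFlatq F0 lfl[j] = true → j ≤ n0 := by
    intro j hj hq
    by_contra hc
    exact hlater j hj (by omega) ((pvFlatq_iff F0 lfl[j]).mp hq)
  rw [pvA_char st lfl hne n0 hn0 hqn0 hmax, pvB_char st lfl n0 hn0 hget]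
  set FL := (pvOcc st lfl).getLast hne with hFLdef
  by_cases hall : ∀ f ∈ pvOcc st lfl, f ∈ lfl[n0].flatten
  · have hFLfl : FL ∈ lfl[n0].flatten := hall FL (List.getLast_mem hne)
    rw [if_pos ((pvFlatq_iff FL lfl[n0]).mpr hFLfl), if_pos hall]
  · rw [if_neg hall]
    have hFLnot : pvFlatq FL lfl[n0] = false := by
      cases hb : pvFlatq FL lfl[n0] with
      | false => rfl
      | true =>
        exfalso
        apply hnD
        rw [pvD_iff]
        have hLeq : pvLast st lfl = lfl[n0].flatten := pvLast_eq st lfl hne n0 hn0 hfn0 hlater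
        refine ⟨?_, ?_⟩
        · rw [pvGetLastD_eq st lfl hne, hLeq]
          exact (pvFlatq_iff FL lfl[n0]).mp hb
        · obtain ⟨f, hf⟩ := not_forall.mp hall
          obtain ⟨hf1, hf2⟩ := Classical.not_imp.mp hf
          refine ⟨f, hf1, ?_⟩
          rw [hLeq]
          exact hf2
    rw [hFLnot]
    simp

theorem get_formula_level_changed : Claim_changed_get_formula_level := by
  unfold Claim_changed_get_formula_level
  decide

theorem get_formula_level_tight : Claim_exact_get_formula_level := by
  intro st lfl hdom hpre hD
  have hne : pvOcc st lfl ≠ [] := pvPre_ne st lfl hpre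
  obtain ⟨n0, hn0, hfn0, hget, hlater⟩ := pvSetup st lfl hne
  set F0 := PySem.List.pyGetD (pvOcc st lfl) 0 "" with hF0def
  obtain ⟨hDlast, f, hfocc, hfnot⟩ := (pvD_iff st lfl).mp hD
  have hLeq : pvLast st lfl = lfl[n0].flatten := pvLast_eq st lfl hne n0 hn0 hfn0 hlater
  rw [hLeq] at hDlast hfnot
  have hqn0 : pvFlatq F0 lfl[n0] = true := (pvFlatq_iff F0 lfl[n0]).mpr hfn0
  have hmax : ∀ j : Nat, ∀ hj : j < lfl.length, pvFlatq F0 lfl[j] = true → j ≤ n0 := by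
    intro j hj hq
    by_contra hc
    exact hlater j hj (by omega) ((pvFlatq_iff F0 lfl[j]).mp hq)
  rw [pvA_char st lfl hne n0 hn0 hqn0 hmax, pvB_char st lfl n0 hn0 hget]
  rw [pvGetLastD_eq st lfl hne] at hDlast
  rw [if_pos ((pvFlatq_iff _ lfl[n0]).mpr hDlast)]
  rw [if_neg (fun hc => hfnot (hc f hfocc))]
  omega
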